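-- pv_equiv track=rewrite | github.com/Chriskamphuis/adventofcode2018 | 8/8-2.py | find_meta_data
-- ===== SOURCE A (Python) =====
-- def find_meta_data(tree):
--     no_child_nodes, no_meta_data = tree[:2]
--     tail = tree[2:]
--     if no_child_nodes == 0:
--         return sum(tail[:no_meta_data]), tail[no_meta_data:]
--     scores = []
--     out = 0
--     for n in range(no_child_nodes):
--         s, tail = find_meta_data(tail)
--         scores.append(s)
--     for n in range(no_meta_data):
--         try:
--             out += scores[tail[n]-1]
--         except:
--             pass
--     return out, tail[no_meta_data:]
-- ===== SOURCE B (Python) =====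
-- def find_meta_data(tree):
--     def parse(i):
--         # parse the node whose header starts at index i; return (score, index past the node)
--         no_child_nodes, no_meta_data = tree[i], tree[i + 1]
--         i += 2
--         if no_child_nodes == 0:
--             return sum(tree[i:i + no_meta_data]), i + no_meta_data
--         scores = []
--         for _ in range(no_child_nodes):
--             s, i = parse(i)
--             scores.append(s)
--         score = 0
--         for m in tree[i:i + no_meta_data]:
--             try:
--                 score += scores[m - 1]
--             except IndexError:
--                 pass
--         return score, i + no_meta_data
--     score, end = parse(0)
--     return score, tree[end:]
-- ===== Notes on version B (the rewrite author's own statement) =====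
-- stated objective: alternative
-- what changed: Replaces A's recursion on list slices (tail = tree[2:] and repeated re-slicing, which copies the remaining list at every node) with a single-pass recursion over a shared index into the original list; Pre_ excludes trees in which a visited header carries a negative metadata count: such counts are outside the tree format, A's slice-from-the-end value and B's index-arithmetic value there are equally accidental, and no one would specify either.
-- outside the precondition, e.g. on find_meta_data([0, -1, 5, 6]): A returns (5, [6]), B returns (0, [-1, 5, 6])
import Mathlib
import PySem

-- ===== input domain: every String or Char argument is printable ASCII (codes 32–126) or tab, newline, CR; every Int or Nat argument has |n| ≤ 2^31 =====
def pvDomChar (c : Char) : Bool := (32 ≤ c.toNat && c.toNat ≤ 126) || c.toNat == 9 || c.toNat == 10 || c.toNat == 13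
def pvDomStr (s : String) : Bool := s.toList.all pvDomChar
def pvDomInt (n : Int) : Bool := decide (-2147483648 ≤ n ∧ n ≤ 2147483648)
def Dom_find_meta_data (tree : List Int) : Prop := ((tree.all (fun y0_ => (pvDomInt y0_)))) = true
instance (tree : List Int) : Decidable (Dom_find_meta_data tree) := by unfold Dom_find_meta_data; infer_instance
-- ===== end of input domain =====

-- B re-implements A's slice-and-rebuild recursion (tail = tree[2:] copies the rest
-- of the list at every node) as a single-pass recursion over a shared index into
-- the original list; only the final remainder is materialised with one slice.

-- ===== PORT A =====
-- A recurses on list suffixes; fuel (tree.length + 1, strictly more than the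
-- recursion depth on any input A returns on) only makes the recursion total in Lean.
def findA : Nat → List Int → Int × List Int
  | 0, _ => (0, [])
  | fuel+1, tree =>
    match tree with
    | nc :: nm :: tail =>
      if nc = 0 then
        ((PySem.List.slice tail none (some nm)).sum, PySem.List.slice tail (some nm) none)
      else
        -- for n in range(no_child_nodes): s, tail = find_meta_data(tail); scores.append(s)
        let p := (List.range nc.toNat).foldl
          (fun (acc : List Int × List Int) _ =>
            let r := findA fuel acc.2
            (acc.1 ++ [r.1], r.2)) ([], tail)
        -- for n in range(no_meta_data): try: out += scores[tail[n]-1] except: pass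
        let out := (List.range nm.toNat).foldl
          (fun o (k : Nat) =>
            match PySem.List.pyGet? p.2 (k : Int) with
            | none => o
            | some m =>
              match PySem.List.pyGet? p.1 (m - 1) with
              | none => o
              | some s => o + s) 0
        (out, PySem.List.slice p.2 (some nm) none)
    | _ => (0, [])  -- fewer than 2 values: Python raises (excluded by Pre_)

def find_meta_data (tree : List Int) : Int × List Int := findA (tree.length + 1) tree

-- ===== PORT B =====
-- parse(i) of Source B: node header at index i, returns (score, index past the node).
def parseB (tree : List Int) : Nat → Int → Int × Int
  | 0, i => (0, i)
  | fuel+1, i =>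
    match PySem.List.pyGet? tree i, PySem.List.pyGet? tree (i+1) with
    | some nc, some nm =>
      let i2 := i + 2
      if nc = 0 then
        ((PySem.List.slice tree (some i2) (some (i2 + nm))).sum, i2 + nm)
      else
        -- for _ in range(no_child_nodes): s, i = parse(i); scores.append(s)
        let q := (List.range nc.toNat).foldl
          (fun (acc : List Int × Int) _ =>
            let r := parseB tree fuel acc.2
            (acc.1 ++ [r.1], r.2)) ([], i2)
        -- for m in tree[i:i+no_meta_data]: try: score += scores[m-1] except IndexError: pass
        let total := (PySem.List.slice tree (some q.2) (some (q.2 + nm))).foldl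
          (fun o m =>
            match PySem.List.pyGet? q.1 (m - 1) with
            | none => o
            | some s => o + s) 0
        (total, q.2 + nm)
    | _, _ => (0, i)  -- header out of range: Python raises (excluded by Pre_)

def find_meta_data_alt (tree : List Int) : Int × List Int :=
  let r := parseB tree (tree.length + 1) 0
  (r.1, PySem.List.slice tree (some r.2) none)

-- ===== PRECONDITION & SPEC =====
-- Shape checker: `chkF fuel k t` checks that k consecutive well-formed nodes start
-- at the head of t — each visited node has a 2-value header (otherwise A's tuple
-- unpacking `nc, nm = tree[:2]` raises ValueError) and a NONNEGATIVE metadata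
-- count — and returns the remainder.  It tracks only remainders, no scores.  The
-- structural bound `fuel` (tree.length + 1, proved sufficient below, lemma
-- chkF_eq_chkKV) exists only so that the kernel can evaluate Pre_ by `decide`.
def chkF : Nat → Nat → List Int → Option (List Int)
  | _, 0, t => some t
  | 0, _+1, _ => none
  | fuel+1, k+1, t =>
    match t with
    | nc :: nm :: t' =>
      if nm < 0 then none
      else
        (if nc ≤ 0 then some (PySem.List.slice t' (some nm) none)
         else (chkF fuel nc.toNat t').map (fun m => PySem.List.slice m (some nm) none)).bind
          (chkF fuel k)
    | _ => none

-- Pre_ excludes (a) malformed trees, on which A raises ValueError, and (b) trees in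
-- which a visited header carries a negative metadata count: such counts are outside
-- the tree format, and A's slice-from-the-end value and B's index-arithmetic value
-- there are equally accidental — no one would specify either.
def Pre_find_meta_data (tree : List Int) : Prop := (chkF (tree.length + 1) 1 tree).isSome = true
instance (tree : List Int) : Decidable (Pre_find_meta_data tree) := by unfold Pre_find_meta_data; infer_instance

def pvWitness_find_meta_data : List Int := [2, 3, 0, 3, 10, 11, 12, 1, 1, 0, 1, 99, 2, 1, 1, 2]

def Spec_find_meta_data (tree : List Int) (out : Int × List Int) : Prop := out = find_meta_data_alt tree
instance (tree : List Int) (out : Int × List Int) : Decidable (Spec_find_meta_data tree out) := by unfold Spec_find_meta_data; infer_instance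

-- ===== CLAIM (what is proved, stated in full; the proofs are below) =====
def Claim_equal_find_meta_data : Prop := ∀ (tree : List Int), Dom_find_meta_data tree → Pre_find_meta_data tree → Spec_find_meta_data tree (find_meta_data tree)

-- ===== LEMMAS AND PROOFS =====

-- Needed by chkNode's termination: a Python slice never lengthens a list.
theorem pv_slice_from_len_le (t : List Int) (a : Int) :
    (PySem.List.slice t (some a) none).length ≤ t.length := by
  rw [PySem.List.slice_some_none]
  simp

-- The same shape checker, structurally recursive (no fuel), carrying the length
-- bound the termination argument needs.
mutual
def chkNode : (l : List Int) → Option {r : List Int // r.length + 2 ≤ l.length}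
  | nc :: nm :: t =>
    if nm < 0 then none
    else if nc ≤ 0 then
      some ⟨PySem.List.slice t (some nm) none, by
        have := pv_slice_from_len_le t nm; simp only [List.length_cons]; omega⟩
    else
      match chkKids nc.toNat t with
      | none => none
      | some ⟨m, hm⟩ =>
        some ⟨PySem.List.slice m (some nm) none, by
          have := pv_slice_from_len_le m nm; simp only [List.length_cons]; omega⟩
  | _ => none
termination_by l => (l.length, 1)

def chkKids : (k : Nat) → (t : List Int) → Option {m : List Int // m.length ≤ t.length}
  | 0, t => some ⟨t, le_rfl⟩
  | k+1, t =>
    match chkNode t with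
    | none => none
    | some ⟨m, hm⟩ =>
      match chkKids k m with
      | none => none
      | some ⟨r, hr⟩ => some ⟨r, by omega⟩
termination_by _ t => (t.length, 2)
end

-- plain-valued views of the shape checker (drop the length proofs)
def chkV (l : List Int) : Option (List Int) := (chkNode l).map Subtype.val
def chkKV (k : Nat) (t : List Int) : Option (List Int) := (chkKids k t).map Subtype.val

theorem chkV_len {l rv : List Int} (h : chkV l = some rv) : rv.length + 2 ≤ l.length := by
  unfold chkV at h
  cases hc : chkNode l with
  | none => rw [hc] at h; simp at h
  | some r => rw [hc] at h; simp at h; subst h; exact r.2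

theorem chkV_cons (nc nm : Int) (t : List Int) :
    chkV (nc :: nm :: t)
      = if nm < 0 then none
        else if nc ≤ 0 then some (PySem.List.slice t (some nm) none)
        else (chkKV nc.toNat t).map (fun m => PySem.List.slice m (some nm) none) := by
  by_cases hm : nm < 0
  · simp [chkV, chkNode, hm]
  · by_cases h : nc ≤ 0
    · simp [chkV, chkNode, hm, h]
    · cases hk : chkKids nc.toNat t with
      | none => simp [chkV, chkKV, chkNode, hm, h, hk]
      | some m => simp [chkV, chkKV, chkNode, hm, h, hk]

theorem chkKV_zero (t : List Int) : chkKV 0 t = some t := by simp [chkKV, chkKids]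

theorem chkKV_succ (k : Nat) (t : List Int) :
    chkKV (k+1) t = (chkV t).bind (fun m => chkKV k m) := by
  cases hn : chkNode t with
  | none => simp [chkKV, chkV, chkKids, hn]
  | some m =>
    cases hk : chkKids k m.val with
    | none => simp [chkKV, chkV, chkKids, hn, hk]
    | some r => simp [chkKV, chkV, chkKids, hn, hk]

-- tail[nm:] on the suffix (0 ≤ nm) = drop to the absolute index i + nm
theorem sliceFrom_abs (tree : List Int) (i : Nat) (nm : Int) (h : 0 ≤ nm) :
    PySem.List.slice (tree.drop i) (some nm) none = tree.drop (i + nm.toNat) := by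
  rw [PySem.List.slice_some_none, List.drop_drop]
  rcases Nat.le_total (i + nm.toNat) tree.length with hc | hc
  · congr 1
    unfold PySem.List.clampIdx
    simp only [List.length_drop]
    split_ifs <;> omega
  · rw [List.drop_eq_nil_of_le, List.drop_eq_nil_of_le hc]
    unfold PySem.List.clampIdx
    simp only [List.length_drop]
    split_ifs <;> omega

-- tail[:nm] on the suffix (0 ≤ nm) = take of the suffix
theorem sliceTo_take (tree : List Int) (i : Nat) (nm : Int) (h : 0 ≤ nm) :
    PySem.List.slice (tree.drop i) none (some nm) = (tree.drop i).take nm.toNat := by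
  rw [PySem.List.slice_to _ h]

-- B's absolute slice tree[i:i+nm] (0 ≤ nm) = take of the suffix
theorem sliceAbs_take (tree : List Int) (i : Nat) (nm : Int) (h : 0 ≤ nm) :
    PySem.List.slice tree (some (i : Int)) (some ((i : Int) + nm)) = (tree.drop i).take nm.toNat := by
  have : ((i : Int) + nm) = ((i : Int) + (nm.toNat : Int)) := by omega
  rw [this, PySem.List.slice_natCast_add]

-- A's metadata loop (range + IndexError-skipping reads) = fold over take
theorem foldl_range_pyGet (xs : List Int) (g : Int → Int → Int) (K : Nat) (init : Int) :
    (List.range K).foldl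
      (fun o (k : Nat) =>
        match PySem.List.pyGet? xs (k : Int) with
        | none => o
        | some m => g o m) init
    = (xs.take K).foldl g init := by
  induction K with
  | zero => simp
  | succ K ih =>
    rw [List.range_succ, List.foldl_append, ih, List.take_add_one, List.foldl_append]
    rcases Nat.lt_or_ge K xs.length with h | h
    · simp [PySem.List.pyGet?_natCast, List.getElem?_eq_getElem h]
    · simp [PySem.List.pyGet?_natCast, List.getElem?_eq_none_iff.mpr h]

-- main simulation: on a well-shaped suffix the two ports agree step for step
theorem main_sim (tree : List Int) :
    ∀ fuel : Nat, ∀ i : Nat, tree.length - i < 2 * fuel →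
    ∀ rv : List Int, chkV (tree.drop i) = some rv →
      ∃ (s : Int) (j : Nat),
        parseB tree fuel (i : Int) = (s, (j : Int)) ∧
        findA fuel (tree.drop i) = (s, tree.drop j) ∧
        i + 2 ≤ j ∧ rv = tree.drop j := by
  intro fuel
  induction fuel with
  | zero => intro i hb; omega
  | succ fuel ih =>
    intro i hb rv hr
    have hlen : i + 2 ≤ tree.length := by
      have := chkV_len hr; simp only [List.length_drop] at this; omega
    have hi1 : i < tree.length := by omega
    have hi2 : i + 1 < tree.length := by omega
    set nc := tree[i] with hnc
    set nm := tree[i+1] with hnm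
    have hsplit : tree.drop i = nc :: nm :: tree.drop (i+2) := by
      rw [List.drop_eq_getElem_cons hi1, List.drop_eq_getElem_cons hi2]
    have hgB1 : PySem.List.pyGet? tree (i : Int) = some nc := by
      rw [PySem.List.pyGet?_natCast]; exact List.getElem?_eq_getElem hi1
    have hgB2 : PySem.List.pyGet? tree ((i : Int) + 1) = some nm := by
      have hc : ((i : Int) + 1) = ((i + 1 : Nat) : Int) := by push_cast; ring
      rw [hc, PySem.List.pyGet?_natCast]; exact List.getElem?_eq_getElem hi2
    rw [hsplit, chkV_cons] at hr
    have hnmpos : ¬ nm < 0 := by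
      intro h; rw [if_pos h] at hr; simp at hr
    rw [if_neg hnmpos] at hr
    have hnm0 : 0 ≤ nm := by omega
    -- children loop simulation
    have kids : ∀ (k : Nat) (i0 : Nat), tree.length - i0 < 2 * fuel →
        ∀ mv : List Int, chkKV k (tree.drop i0) = some mv →
        ∀ acc : List Int,
          ∃ (scores : List Int) (j : Nat),
            (List.range k).foldl
              (fun (a : List Int × Int) _ =>
                let r := parseB tree fuel a.2
                (a.1 ++ [r.1], r.2)) (acc, (i0 : Int)) = (acc ++ scores, (j : Int)) ∧
            (List.range k).foldl
              (fun (a : List Int × List Int) _ =>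
                let r := findA fuel a.2
                (a.1 ++ [r.1], r.2)) (acc, tree.drop i0) = (acc ++ scores, tree.drop j) ∧
            i0 ≤ j ∧ mv = tree.drop j := by
      intro k
      induction k with
      | zero =>
        intro i0 hb0 mv hmv acc
        rw [chkKV_zero] at hmv
        exact ⟨[], i0, by simp, by simp, le_rfl, by simpa using hmv.symm⟩
      | succ k ihk =>
        intro i0 hb0 mv hmv acc
        rw [chkKV_succ] at hmv
        cases hcn : chkV (tree.drop i0) with
        | none => rw [hcn] at hmv; simp at hmv
        | some m1 =>
          rw [hcn] at hmv; simp only [Option.bind_some] at hmv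
          obtain ⟨s1, j1, hpB, hpA, hj1l, hm1⟩ := ih i0 hb0 m1 hcn
          rw [hm1] at hmv
          obtain ⟨scores, j, hfB, hfA, hjl, hmj⟩ :=
            ihk j1 (by omega) mv hmv (acc ++ [s1])
          refine ⟨s1 :: scores, j, ?_, ?_, by omega, hmj⟩
          · rw [List.range_succ_eq_map, List.foldl_cons, List.foldl_map]
            simpa [hpB] using hfB
          · rw [List.range_succ_eq_map, List.foldl_cons, List.foldl_map]
            simpa [hpA] using hfA
    by_cases hc0 : nc = 0
    · -- leaf node
      rw [if_pos (by omega : nc ≤ 0)] at hr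
      refine ⟨((tree.drop (i+2)).take nm.toNat).sum, i + 2 + nm.toNat, ?_, ?_, by omega, ?_⟩
      · simp only [parseB, hgB1, hgB2, if_pos hc0]
        have hcast : ((i : Int) + 2) = ((i + 2 : Nat) : Int) := by push_cast; ring
        rw [hcast, sliceAbs_take tree (i+2) nm hnm0,
          show ((i + 2 : Nat) : Int) + nm = ((i + 2 + nm.toNat : Nat) : Int) by push_cast; omega]
      · rw [hsplit]
        simp only [findA, if_pos hc0]
        rw [sliceTo_take tree (i+2) nm hnm0, sliceFrom_abs tree (i+2) nm hnm0]
      · simp only [Option.some.injEq] at hr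
        rw [← hr, sliceFrom_abs tree (i+2) nm hnm0]
    · -- internal node (nc < 0 behaves as an internal node with no children)
      have hmk : ∃ mv, chkKV nc.toNat (tree.drop (i+2)) = some mv ∧
          rv = PySem.List.slice mv (some nm) none := by
        by_cases hneg : nc ≤ 0
        · rw [if_pos hneg] at hr
          refine ⟨tree.drop (i+2), ?_, ?_⟩
          · have h0 : nc.toNat = 0 := by omega
            rw [h0, chkKV_zero]
          · simpa using hr.symm
        · rw [if_neg hneg] at hr
          cases hk : chkKV nc.toNat (tree.drop (i+2)) with
          | none => rw [hk] at hr; simp at hr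
          | some mv => rw [hk] at hr; simp at hr; exact ⟨mv, rfl, hr.symm⟩
      obtain ⟨mv, hmk, hrv⟩ := hmk
      obtain ⟨scores, j, hfB, hfA, hjl, hmj⟩ :=
        kids nc.toNat (i+2) (by omega) mv hmk []
      push_cast at hfB
      simp only [List.nil_append] at hfB hfA
      refine ⟨((tree.drop j).take nm.toNat).foldl
               (fun o m =>
                 match PySem.List.pyGet? scores (m - 1) with
                 | none => o
                 | some s => o + s) 0,
             j + nm.toNat, ?_, ?_, by omega, ?_⟩
      · simp only [parseB, hgB1, hgB2, if_neg hc0, hfB]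
        rw [sliceAbs_take tree j nm hnm0,
          show ((j : Nat) : Int) + nm = ((j + nm.toNat : Nat) : Int) by push_cast; omega]
      · rw [hsplit]
        simp only [findA, if_neg hc0, hfA]
        rw [foldl_range_pyGet (tree.drop j)
              (fun o m =>
                 match PySem.List.pyGet? scores (m - 1) with
                 | none => o
                 | some s => o + s) nm.toNat 0,
            sliceFrom_abs tree j nm hnm0]
      · rw [hrv, hmj, sliceFrom_abs tree j nm hnm0]

theorem chkKV_len {k : Nat} {t mv : List Int} (h : chkKV k t = some mv) : mv.length ≤ t.length := by
  unfold chkKV at h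
  cases hc : chkKids k t with
  | none => rw [hc] at h; simp at h
  | some m => rw [hc] at h; simp at h; subst h; exact m.2

theorem chkV_short (l : List Int) (h : l.length < 2) : chkV l = none := by
  match l, h with
  | [], _ => simp [chkV, chkNode]
  | [x], _ => simp [chkV, chkNode]

-- the structural bound tree.length + 1 used by Pre_ is sufficient
theorem chkF_eq_chkKV : ∀ (f k : Nat) (t : List Int), t.length < 2 * f → chkF f k t = chkKV k t := by
  intro f
  induction f with
  | zero => intro k t h; omega
  | succ f ihf =>
    intro k t h
    cases k with
    | zero => rw [chkKV_zero]; rfl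
    | succ k =>
      match t with
      | [] => rw [chkKV_succ, chkV_short [] (by simp)]; rfl
      | [x] => rw [chkKV_succ, chkV_short [x] (by simp)]; rfl
      | nc :: nm :: t' =>
        rw [chkF, chkKV_succ, chkV_cons]
        simp only [List.length_cons] at h
        by_cases hm : nm < 0
        · rw [if_pos hm, if_pos hm]; rfl
        · rw [if_neg hm, if_neg hm]
          by_cases hneg : nc ≤ 0
          · rw [if_pos hneg, if_pos hneg]
            simp only [Option.bind_some]
            exact ihf k _ (by have := pv_slice_from_len_le t' nm; omega)
          · rw [if_neg hneg, if_neg hneg]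
            rw [ihf nc.toNat t' (by omega)]
            cases hmk : chkKV nc.toNat t' with
            | none => rfl
            | some m =>
              simp only [Option.map_some, Option.bind_some]
              have hml := chkKV_len hmk
              exact ihf k _ (by have := pv_slice_from_len_le m nm; omega)

-- ===== VERDICT (by name: the statement is the Claim_ definition above) =====
theorem find_meta_data_spec : Claim_equal_find_meta_data := by
  intro tree _ hpre
  unfold Pre_find_meta_data at hpre
  rw [chkF_eq_chkKV _ _ _ (by omega), chkKV_succ] at hpre
  have hsome : ∃ rv, chkV tree = some rv := by
    cases hc : chkV tree with
    | none => rw [hc] at hpre; simp at hpre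
    | some rv => exact ⟨rv, rfl⟩
  obtain ⟨rv, hrv⟩ := hsome
  have hchk : chkV (tree.drop 0) = some rv := by rw [List.drop_zero]; exact hrv
  obtain ⟨s, j, hB, hA, _, _⟩ :=
    main_sim tree (tree.length + 1) 0 (by omega) rv hchk
  rw [List.drop_zero] at hA
  unfold Spec_find_meta_data find_meta_data find_meta_data_alt
  rw [hA]
  have h0 : ((0 : Nat) : Int) = (0 : Int) := by simp
  rw [← h0, hB]
  simp [PySem.List.slice_from tree (Int.natCast_nonneg j)]
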